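-- pv_equiv track=rewrite | github.com/sbilikepy/BS_workspace | Lessons/HTML + CSS basics/daily_html_css.py | cat_and_dog_years
-- ===== SOURCE A (Python) =====
-- def cat_and_dog_years(cat_years: int, dog_years: int) -> list:
--     cat = 0
--     dog = 0
--     cat_flag, dog_flag = False, False
--     if cat_years // 15 >= 1:
--         cat += 1
--         cat_years -= 15
--         if cat_years // 9 >= 1:
--             cat += 1
--             cat_years -= 9
--             cat_flag = True
--     if cat_flag:
--         while cat_years // 4 >= 1:
--             cat += 1
--             cat_years -= 4
--
--     if dog_years // 15 >= 1:
--         dog += 1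
--         dog_years -= 15
--         if dog_years // 9 >= 1:
--             dog += 1
--             dog_years -= 9
--             dog_flag = True
--     if dog_flag:
--         while dog_years // 5 >= 1:
--             dog += 1
--             dog_years -= 5
--
--     return [cat, dog]
-- ===== SOURCE B (Python) =====
-- def cat_and_dog_years(cat_years: int, dog_years: int) -> list:
--     def milestones(years, step):
--         if years >= 24:
--             return 2 + (years - 24) // step
--         if years >= 15:
--             return 1
--         return 0
--     return [milestones(cat_years, 4), milestones(dog_years, 5)]
-- ===== Notes on version B (the rewrite author's own statement) =====
-- stated objective: faster
-- what changed: Replaced the repeated-subtraction while loops with a closed-form integer division (2 + (years - 24) // step after the two fixed thresholds), folding the duplicated cat/dog code into one helper.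
import Mathlib
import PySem

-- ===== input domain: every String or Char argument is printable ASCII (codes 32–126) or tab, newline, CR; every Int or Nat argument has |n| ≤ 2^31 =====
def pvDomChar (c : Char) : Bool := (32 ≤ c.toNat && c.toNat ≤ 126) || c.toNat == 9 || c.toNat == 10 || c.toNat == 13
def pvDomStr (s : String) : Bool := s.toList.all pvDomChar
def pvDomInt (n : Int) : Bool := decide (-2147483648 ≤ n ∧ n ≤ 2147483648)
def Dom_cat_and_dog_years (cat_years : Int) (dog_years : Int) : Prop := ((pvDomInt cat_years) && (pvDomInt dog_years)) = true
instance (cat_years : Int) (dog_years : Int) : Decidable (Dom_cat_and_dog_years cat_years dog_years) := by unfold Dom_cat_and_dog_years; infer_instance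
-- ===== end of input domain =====

-- B replaces A's repeated-subtraction while loops by a closed-form integer division (objective: faster).

-- ===== PORT A =====
-- cited by the ports' termination proofs: y // b >= 1 (Python floor division) iff b <= y, for 0 < b
theorem one_le_floordiv_iff (a b : Int) (hb : 0 < b) : 1 ≤ PySem.Int.floordiv a b ↔ b ≤ a := by
  rw [PySem.Int.floordiv_eq_ediv_of_pos (a := a) (b := b) hb, Int.le_ediv_iff_mul_le hb, one_mul]

-- the 'while cat_years // 4 >= 1' loop of A, carrying (cat, cat_years)
def pvWhile4 (cat : Int) (y : Int) : Int × Int :=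
  if h : 1 ≤ PySem.Int.floordiv y 4 then pvWhile4 (cat + 1) (y - 4) else (cat, y)
termination_by y.toNat
decreasing_by
  have h4 : (4 : Int) ≤ y := (one_le_floordiv_iff y 4 (by omega)).mp h
  omega

-- the 'while dog_years // 5 >= 1' loop of A, carrying (dog, dog_years)
def pvWhile5 (dog : Int) (y : Int) : Int × Int :=
  if h : 1 ≤ PySem.Int.floordiv y 5 then pvWhile5 (dog + 1) (y - 5) else (dog, y)
termination_by y.toNat
decreasing_by
  have h5 : (5 : Int) ≤ y := (one_le_floordiv_iff y 5 (by omega)).mp h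
  omega

-- the two nested 'if' blocks of A, producing (count, remaining_years, flag); identical for cat and dog
def pvIfBlock (y : Int) : Int × Int × Bool :=
  if 1 ≤ PySem.Int.floordiv y 15 then
    let c := (0 : Int) + 1
    let y' := y - 15
    if 1 ≤ PySem.Int.floordiv y' 9 then (c + 1, y' - 9, true) else (c, y', false)
  else (0, y, false)

def pvCatCount (y : Int) : Int :=
  if (pvIfBlock y).2.2 then (pvWhile4 (pvIfBlock y).1 (pvIfBlock y).2.1).1 else (pvIfBlock y).1

def pvDogCount (y : Int) : Int :=
  if (pvIfBlock y).2.2 then (pvWhile5 (pvIfBlock y).1 (pvIfBlock y).2.1).1 else (pvIfBlock y).1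

def cat_and_dog_years (cat_years : Int) (dog_years : Int) : List Int :=
  [pvCatCount cat_years, pvDogCount dog_years]

-- ===== PORT B =====
def pvMilestones (years : Int) (step : Int) : Int :=
  if 24 ≤ years then 2 + PySem.Int.floordiv (years - 24) step
  else if 15 ≤ years then 1
  else 0

def cat_and_dog_years_alt (cat_years : Int) (dog_years : Int) : List Int :=
  [pvMilestones cat_years 4, pvMilestones dog_years 5]

-- ===== PRECONDITION & SPEC =====
def Spec_cat_and_dog_years (cat_years : Int) (dog_years : Int) (out : List Int) : Prop := out = cat_and_dog_years_alt cat_years dog_years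
instance (cat_years : Int) (dog_years : Int) (out : List Int) : Decidable (Spec_cat_and_dog_years cat_years dog_years out) := by unfold Spec_cat_and_dog_years; infer_instance

-- ===== CLAIM (what is proved, stated in full; the proofs are below) =====
def Claim_equal_cat_and_dog_years : Prop := ∀ (cat_years : Int) (dog_years : Int), Dom_cat_and_dog_years cat_years dog_years → Spec_cat_and_dog_years cat_years dog_years (cat_and_dog_years cat_years dog_years)

-- ===== LEMMAS AND PROOFS =====
theorem pvWhile4_fst : ∀ (n : Nat) (cat y : Int), y.toNat = n → 0 ≤ y →
    (pvWhile4 cat y).1 = cat + PySem.Int.floordiv y 4 := by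
  intro n
  induction n using Nat.strong_induction_on with
  | _ n ih =>
    intro cat y hn hy
    rw [pvWhile4]
    rw [PySem.Int.floordiv_eq_ediv_of_pos (a := y) (b := 4) (by omega)]
    split_ifs with h
    · have h4 : (4 : Int) ≤ y := by omega
      rw [ih (y - 4).toNat (by omega) (cat + 1) (y - 4) rfl (by omega)]
      rw [PySem.Int.floordiv_eq_ediv_of_pos (a := y - 4) (b := 4) (by omega)]
      omega
    · simp only
      omega

theorem pvWhile5_fst : ∀ (n : Nat) (dog y : Int), y.toNat = n → 0 ≤ y →
    (pvWhile5 dog y).1 = dog + PySem.Int.floordiv y 5 := by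
  intro n
  induction n using Nat.strong_induction_on with
  | _ n ih =>
    intro dog y hn hy
    rw [pvWhile5]
    rw [PySem.Int.floordiv_eq_ediv_of_pos (a := y) (b := 5) (by omega)]
    split_ifs with h
    · have h5 : (5 : Int) ≤ y := by omega
      rw [ih (y - 5).toNat (by omega) (dog + 1) (y - 5) rfl (by omega)]
      rw [PySem.Int.floordiv_eq_ediv_of_pos (a := y - 5) (b := 5) (by omega)]
      omega
    · simp only
      omega

theorem cat_side (y : Int) : pvCatCount y = pvMilestones y 4 := by
  unfold pvCatCount pvIfBlock pvMilestones
  simp only [one_le_floordiv_iff _ 15 (by omega), one_le_floordiv_iff _ 9 (by omega)]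
  by_cases h15 : (15 : Int) ≤ y
  · by_cases h24 : (24 : Int) ≤ y
    · simp only [if_pos h15, if_pos (show (9:Int) ≤ y - 15 by omega), if_pos h24]
      rw [pvWhile4_fst (y - 15 - 9).toNat (0 + 1 + 1) (y - 15 - 9) rfl (by omega)]
      rw [show y - 15 - 9 = y - 24 from by ring]
      norm_num
    · simp only [if_pos h15, if_neg (show ¬ ((9:Int) ≤ y - 15) by omega), if_neg h24]
      norm_num
  · simp only [if_neg h15, if_neg (show ¬ ((24:Int) ≤ y) by omega)]
    norm_num

theorem dog_side (y : Int) : pvDogCount y = pvMilestones y 5 := by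
  unfold pvDogCount pvIfBlock pvMilestones
  simp only [one_le_floordiv_iff _ 15 (by omega), one_le_floordiv_iff _ 9 (by omega)]
  by_cases h15 : (15 : Int) ≤ y
  · by_cases h24 : (24 : Int) ≤ y
    · simp only [if_pos h15, if_pos (show (9:Int) ≤ y - 15 by omega), if_pos h24]
      rw [pvWhile5_fst (y - 15 - 9).toNat (0 + 1 + 1) (y - 15 - 9) rfl (by omega)]
      rw [show y - 15 - 9 = y - 24 from by ring]
      norm_num
    · simp only [if_pos h15, if_neg (show ¬ ((9:Int) ≤ y - 15) by omega), if_neg h24]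
      norm_num
  · simp only [if_neg h15, if_neg (show ¬ ((24:Int) ≤ y) by omega)]
    norm_num

-- ===== VERDICT (by name: the statement is the Claim_ definition above) =====
theorem cat_and_dog_years_spec : Claim_equal_cat_and_dog_years := by
  intro c d _
  show _ = _
  unfold cat_and_dog_years cat_and_dog_years_alt
  rw [cat_side c, dog_side d]
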